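-- pv_equiv track=rewrite | github.com/SachithraPinnaduwa/FYP | benchmark2/subjects/dataset/subject_93.py | count_valid_and_pairs
-- ===== SOURCE A (Python) =====
-- def count_valid_and_pairs(A):
--     N = len(A)
--     count = 0
--     for i in range(N):
--         for j in range(i + 1, N):
--             if A[i] & A[j] == A[i]:
--                 count += 1
--     return count
-- ===== SOURCE B (Python) =====
-- def count_valid_and_pairs(A):
--     # Divide and conquer: split the array in half, count pairs recursively in
--     # each half, and add the cross pairs (u in the left half, v in the right
--     # half with u a bitwise submask of v); i<j order is preserved since every
--     # left element precedes every right element.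
--     def cross(L, R):
--         total = 0
--         for v in R:
--             total += sum(1 for u in L if u & v == u)
--         return total
--
--     def solve(lo, hi):
--         if hi - lo < 2:
--             return 0
--         mid = (lo + hi) // 2
--         return solve(lo, mid) + solve(mid, hi) + cross(A[lo:mid], A[mid:hi])
--
--     return solve(0, len(A))
-- ===== Notes on version B (the rewrite author's own statement) =====
-- stated objective: alternative
-- what changed: Replaces the nested index loops over all pairs by a divide-and-conquer recursion: count each half recursively and add cross pairs between the halves, exploiting that every left index precedes every right index.
import Mathlib
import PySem

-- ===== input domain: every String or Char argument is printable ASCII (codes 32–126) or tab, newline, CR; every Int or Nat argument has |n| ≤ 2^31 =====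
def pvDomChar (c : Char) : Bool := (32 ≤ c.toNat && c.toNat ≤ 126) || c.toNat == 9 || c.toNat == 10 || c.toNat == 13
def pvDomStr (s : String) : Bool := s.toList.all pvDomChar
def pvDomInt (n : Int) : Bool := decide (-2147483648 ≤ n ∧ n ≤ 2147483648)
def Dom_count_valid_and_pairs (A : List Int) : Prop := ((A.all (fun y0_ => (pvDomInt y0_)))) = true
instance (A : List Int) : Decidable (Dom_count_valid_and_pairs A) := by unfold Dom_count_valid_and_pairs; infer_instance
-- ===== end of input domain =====

-- B replaces A's nested index loops by a divide-and-conquer recursion: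
-- each half is counted recursively, cross pairs between the halves are added
-- (alternative decomposition, same asymptotic cost, same result).

-- ===== PORT A =====
-- A[i]/A[j] are always in range here, so pyGetD with default 0 is exact.
def count_valid_and_pairs (A : List Int) : Int :=
  let N := PySem.List.len A
  (PySem.List.pyRange 0 N).foldl (fun count i =>
    (PySem.List.pyRange (i + 1) N).foldl (fun count j =>
      if PySem.Int.band (PySem.List.pyGetD A i 0) (PySem.List.pyGetD A j 0) == PySem.List.pyGetD A i 0
      then count + 1 else count) count) 0

-- ===== PORT B =====
-- cross(L, R): for each v of R, add how many u of L are bitwise submasks of v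
def pvCross (L R : List Int) : Int :=
  R.foldl (fun total v => total + (L.countP (fun u => PySem.Int.band u v == u) : Int)) 0

-- solve(lo, hi) of Source B, on the slice itself: Python's lo/hi window A[lo:hi]
-- is carried here as the sublist l (take/drop realise the slices A[lo:mid], A[mid:hi])
def pvSolve (l : List Int) : Int :=
  if l.length < 2 then 0
  else
    pvSolve (l.take (l.length / 2)) + pvSolve (l.drop (l.length / 2))
      + pvCross (l.take (l.length / 2)) (l.drop (l.length / 2))
termination_by l.length
decreasing_by
  · simp only [List.length_take]; omega
  · simp only [List.length_drop]; omega

def count_valid_and_pairs_alt (A : List Int) : Int := pvSolve A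

-- ===== PRECONDITION & SPEC =====
def Spec_count_valid_and_pairs (A : List Int) (out : Int) : Prop := out = count_valid_and_pairs_alt A
instance (A : List Int) (out : Int) : Decidable (Spec_count_valid_and_pairs A out) := by unfold Spec_count_valid_and_pairs; infer_instance

-- ===== CLAIM (what is proved, stated in full; the proofs are below) =====
def Claim_equal_count_valid_and_pairs : Prop := ∀ (A : List Int), Dom_count_valid_and_pairs A → Spec_count_valid_and_pairs A (count_valid_and_pairs A)

-- ===== LEMMAS AND PROOFS =====

-- number of pairs i < j with A[i] a bitwise submask of A[j], row by row
def pvPairs : List Int → Int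
  | [] => 0
  | x :: r => (r.countP (fun y => PySem.Int.band x y == x) : Int) + pvPairs r

-- indices m..len-1 read through pyGetD are the suffix A.drop m
lemma pvRange_map_getD (A : List Int) : ∀ (k m : Nat), A.length - m = k →
    (PySem.List.pyRange (↑m) (PySem.List.len A)).map (fun j => PySem.List.pyGetD A j 0) = A.drop m := by
  intro k
  induction k with
  | zero =>
    intro m hm
    have hnil : PySem.List.pyRange (↑m) (PySem.List.len A) = [] := by
      refine List.eq_nil_iff_forall_not_mem.mpr ?_
      intro x hx
      rw [PySem.List.mem_pyRange_one] at hx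
      simp only [PySem.List.len] at hx
      omega
    rw [hnil, List.drop_eq_nil_of_le (by omega)]
    rfl
  | succ k ih =>
    intro m hm
    have hlt : m < A.length := by omega
    have hlt' : (↑m : Int) < PySem.List.len A := by
      simp only [PySem.List.len]; exact_mod_cast hlt
    rw [PySem.List.pyRange_one_cons hlt', List.map_cons]
    have h1 : ((↑m : Int) + 1) = ((↑(m + 1) : Int)) := by push_cast; ring
    rw [h1, ih (m + 1) (by omega)]
    rw [PySem.List.pyGetD_natCast, List.getD_eq_getElem A 0 hlt]
    rw [List.drop_eq_getElem_cons hlt]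

-- the row-wise sum over indices is pvPairs
lemma pvSum_rows (A : List Int) :
    ((List.range A.length).map (fun i =>
      ((A.drop (i + 1)).countP (fun y => PySem.Int.band (A.getD i 0) y == A.getD i 0) : Int))).sum
    = pvPairs A := by
  induction A with
  | nil => simp [pvPairs]
  | cons x r ih =>
    simp only [List.length_cons, List.range_succ_eq_map, List.map_cons, List.map_map, List.sum_cons]
    have hhead : (((x :: r).drop 1).countP (fun y => PySem.Int.band ((x :: r).getD 0 0) y == (x :: r).getD 0 0) : Int)
        = ((r.countP (fun y => PySem.Int.band x y == x)) : Int) := by simp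
    have htail : (List.range r.length).map ((fun i =>
          (((x :: r).drop (i + 1)).countP (fun y => PySem.Int.band ((x :: r).getD i 0) y == (x :: r).getD i 0) : Int)) ∘ Nat.succ)
        = (List.range r.length).map (fun i =>
          ((r.drop (i + 1)).countP (fun y => PySem.Int.band (r.getD i 0) y == r.getD i 0) : Int)) := by
      refine List.map_congr_left ?_
      intro i _
      simp [Function.comp]
    rw [hhead, htail, ih, pvPairs]

-- A's nested loops compute pvPairs
lemma pvA_eq (A : List Int) : count_valid_and_pairs A = pvPairs A := by
  unfold count_valid_and_pairs
  have hbody : ∀ (c : Int), ∀ i ∈ PySem.List.pyRange 0 (PySem.List.len A),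
      (PySem.List.pyRange (i + 1) (PySem.List.len A)).foldl (fun count j =>
        if PySem.Int.band (PySem.List.pyGetD A i 0) (PySem.List.pyGetD A j 0) == PySem.List.pyGetD A i 0
        then count + 1 else count) c
      = c + ((A.drop (i.toNat + 1)).countP (fun y => PySem.Int.band (A.getD i.toNat 0) y == A.getD i.toNat 0) : Int) := by
    intro c i hi
    rw [PySem.List.mem_pyRange_one] at hi
    obtain ⟨h0, _⟩ := hi
    rw [PySem.List.foldl_if_add_one]
    have hii : (i : Int) = ((i.toNat : Nat) : Int) := by omega
    rw [hii]
    simp only [Int.toNat_natCast, PySem.List.pyGetD_natCast]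
    congr 1
    rw [show ((i.toNat : Nat) : Int) + 1 = ((i.toNat + 1 : Nat) : Int) by push_cast; ring]
    rw [← pvRange_map_getD A (A.length - (i.toNat + 1)) (i.toNat + 1) rfl, List.countP_map]
    rfl
  rw [PySem.List.foldl_congr_mem _ _
      (fun c i => c + ((A.drop (i.toNat + 1)).countP (fun y => PySem.Int.band (A.getD i.toNat 0) y == A.getD i.toNat 0) : Int)) _ hbody]
  simp only [PySem.List.len]
  rw [PySem.List.pyRange_zero_natCast, List.foldl_map]
  simp only [Int.toNat_natCast]
  rw [PySem.List.foldl_add, zero_add]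
  exact pvSum_rows A

-- the cross fold is a sum of per-v submask counts
lemma pvCross_eq (L R : List Int) :
    pvCross L R = (R.map (fun v => (L.countP (fun u => PySem.Int.band u v == u) : Int))).sum := by
  unfold pvCross
  rw [PySem.List.foldl_add, zero_add]

-- splitting off the head of the left block of a cross
lemma pvCross_cons (x : Int) (L R : List Int) :
    pvCross (x :: L) R = (R.countP (fun v => PySem.Int.band x v == x) : Int) + pvCross L R := by
  rw [pvCross_eq, pvCross_eq]
  have hmap : R.map (fun v => (((x :: L).countP (fun u => PySem.Int.band u v == u)) : Int))
      = R.map (fun v => (if PySem.Int.band x v == x then (1 : Int) else 0)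
          + (L.countP (fun u => PySem.Int.band u v == u) : Int)) := by
    refine List.map_congr_left ?_
    intro v _
    rw [List.countP_cons]
    push_cast
    by_cases h : PySem.Int.band x v == x <;> simp [h] <;> ring
  rw [hmap, PySem.List.sum_map_add_int, PySem.List.sum_map_ite_one_zero]

-- the pair count splits at any cut into the two block counts plus the cross count
lemma pvPairs_append : ∀ (L R : List Int), pvPairs (L ++ R) = pvPairs L + pvPairs R + pvCross L R := by
  intro L
  induction L with
  | nil =>
    intro R
    simp [pvPairs, pvCross_eq]
  | cons x L' ih =>
    intro R
    simp only [List.cons_append, pvPairs, ih, List.countP_append, pvCross_cons]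
    push_cast
    ring

-- B's divide-and-conquer computes pvPairs (strong induction on length)
lemma pvSolve_eq : ∀ (n : Nat) (l : List Int), l.length ≤ n → pvSolve l = pvPairs l := by
  intro n
  induction n with
  | zero =>
    intro l hl
    have : l = [] := List.eq_nil_of_length_eq_zero (by omega)
    subst this
    simp [pvSolve, pvPairs]
  | succ n ih =>
    intro l hl
    rw [pvSolve]
    by_cases h2 : l.length < 2
    · rw [if_pos h2]
      match l, h2 with
      | [], _ => simp [pvPairs]
      | [x], _ => simp [pvPairs]
    · rw [if_neg h2]
      have hm1 : (l.take (l.length / 2)).length ≤ n := by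
        simp only [List.length_take]; omega
      have hm2 : (l.drop (l.length / 2)).length ≤ n := by
        simp only [List.length_drop]; omega
      rw [ih _ hm1, ih _ hm2, ← pvPairs_append, List.take_append_drop]

lemma pvB_eq (A : List Int) : count_valid_and_pairs_alt A = pvPairs A := by
  unfold count_valid_and_pairs_alt
  exact pvSolve_eq A.length A le_rfl

-- ===== VERDICT (by name: the statement is the Claim_ definition above) =====
theorem count_valid_and_pairs_spec : Claim_equal_count_valid_and_pairs := by
  intro A _
  unfold Spec_count_valid_and_pairs
  rw [pvA_eq, pvB_eq]
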